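-- pv_equiv track=rewrite | github.com/muditbit/python_attack | monitor.py | monitor
-- ===== SOURCE A (Python) =====
-- def monitor(arr,n):
--     s=list(set(arr))
--     s.sort()
--     maxi =0
--     for i in range(len(s)-1,0,-1):
--         h1 = arr.count(s[i])
--         for j in range(0,i):
--             h2 = arr.count(s[j])
--             maxi =max(maxi,h1-h2)
--
--     if maxi >0:
--         return maxi
--     else:
--         return -1
-- ===== SOURCE B (Python) =====
-- def monitor(arr, n):
--     counts = {}
--     for x in arr:
--         counts[x] = counts.get(x, 0) + 1
--     vals = sorted(counts)
--     maxi = 0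
--     if vals:
--         lo = counts[vals[0]]
--         for v in vals[1:]:
--             d = counts[v] - lo
--             if d > maxi:
--                 maxi = d
--             cv = counts[v]
--             if cv < lo:
--                 lo = cv
--     return maxi if maxi > 0 else -1
-- ===== Notes on version B (the rewrite author's own statement) =====
-- stated objective: faster
-- what changed: Replaced the nested loop over all ordered pairs of distinct values, each recomputing arr.count, by a frequency dict built in one pass plus a single sweep over the sorted distinct values that keeps a running minimum count.
import Mathlib
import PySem

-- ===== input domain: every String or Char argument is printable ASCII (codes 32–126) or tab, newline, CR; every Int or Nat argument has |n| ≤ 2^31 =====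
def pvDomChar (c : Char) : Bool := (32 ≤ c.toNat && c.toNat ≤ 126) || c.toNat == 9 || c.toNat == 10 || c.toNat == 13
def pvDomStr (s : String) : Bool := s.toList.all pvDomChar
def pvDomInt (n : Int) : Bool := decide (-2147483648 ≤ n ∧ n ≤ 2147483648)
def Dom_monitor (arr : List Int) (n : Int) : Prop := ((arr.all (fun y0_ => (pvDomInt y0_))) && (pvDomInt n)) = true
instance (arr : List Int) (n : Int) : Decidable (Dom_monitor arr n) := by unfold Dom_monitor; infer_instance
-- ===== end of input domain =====

-- B replaces A's O(m^2) nested scans with repeated arr.count by a counting dict built in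
-- one pass and a single sweep over the sorted distinct values keeping a running minimum count.

-- ===== PORT A =====
-- s = sorted(set(arr)): sorted without key over a set, order-independent, exact.
-- s[i]/s[j]: indices from the ranges are always in [0, len(s)), so the total pyGetD form is exact.
def monitor (arr : List Int) (n : Int) : Int :=
  let s := PySem.List.sorted (PySem.Set.ofList arr) (fun x => x) false
  let maxi := (PySem.List.pyRange ((s.length : Int) - 1) 0 (-1)).foldl (fun maxi i =>
      let h1 : Int := (arr.count (PySem.List.pyGetD s i 0) : Int)
      (PySem.List.pyRange 0 i 1).foldl (fun maxi j =>
        let h2 : Int := (arr.count (PySem.List.pyGetD s j 0) : Int)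
        max maxi (h1 - h2)) maxi) 0
  if maxi > 0 then maxi else -1

-- ===== PORT B =====
-- counts[v] lookups: v is always a key of counts (vals = counts.keys), so getD is exact.
def monitor_alt (arr : List Int) (n : Int) : Int :=
  let counts := arr.foldl (fun d x => d.insert x (d.getD x 0 + 1)) PySem.Dict.empty
  let vals := PySem.List.sorted counts.keys (fun x => x) false
  let maxi : Int :=
    match vals with
    | [] => 0
    | v0 :: rest =>
      (rest.foldl (fun (p : Int × Int) v =>
          let d := counts.getD v 0 - p.2
          let m := if d > p.1 then d else p.1
          let cv := counts.getD v 0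
          let lo := if cv < p.2 then cv else p.2
          (m, lo)) ((0 : Int), counts.getD v0 0)).1
  if maxi > 0 then maxi else -1

-- ===== PRECONDITION & SPEC =====
def Spec_monitor (arr : List Int) (n : Int) (out : Int) : Prop := out = monitor_alt arr n
instance (arr : List Int) (n : Int) (out : Int) : Decidable (Spec_monitor arr n out) := by unfold Spec_monitor; infer_instance

-- ===== CLAIM (what is proved, stated in full; the proofs are below) =====
def Claim_equal_monitor : Prop := ∀ (arr : List Int) (n : Int), Dom_monitor arr n → Spec_monitor arr n (monitor arr n)

-- ===== LEMMAS AND PROOFS =====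

-- B's loop step, with the ifs written as max/min.
theorem pvStep_eq (c : Int → Int) (p : Int × Int) (v : Int) :
    ((if c v - p.2 > p.1 then c v - p.2 else p.1,
      if c v < p.2 then c v else p.2) : Int × Int)
      = (max p.1 (c v - p.2), min p.2 (c v)) := by
  simp only [Prod.mk.injEq, max_def, min_def]
  refine ⟨?_, ?_⟩ <;> split_ifs <;> omega

-- a fold of "max with a constant" steps commutes with an extra max
theorem pv_fmax (g : Int → Int) (l : List Int) (b x : Int) :
    l.foldl (fun m v => max m (g v)) (max b x) = max (l.foldl (fun m v => max m (g v)) b) x := by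
  induction l generalizing b x with
  | nil => rfl
  | cons v l ih =>
    simp only [List.foldl_cons]
    rw [show max (max b x) (g v) = max (max b (g v)) x by omega, ih]

-- two such folds commute
theorem pv_fswap (g1 g2 : Int → Int) (l1 l2 : List Int) (b : Int) :
    l2.foldl (fun m v => max m (g2 v)) (l1.foldl (fun m v => max m (g1 v)) b)
      = l1.foldl (fun m v => max m (g1 v)) (l2.foldl (fun m v => max m (g2 v)) b) := by
  induction l1 generalizing b with
  | nil => rfl
  | cons v l1 ih =>
    simp only [List.foldl_cons]
    rw [ih (max b (g1 v)), pv_fmax g2 l2 b (g1 v)]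

-- a max-of-differences fold against a running minimum
theorem pv_maxmin (c : Int → Int) (h1 : Int) (q : List Int) (b a : Int) :
    q.foldl (fun m v => max m (h1 - c v)) (max b (h1 - a))
      = max b (h1 - q.foldl (fun a v => min a (c v)) a) := by
  induction q generalizing a with
  | nil => rfl
  | cons v q ih =>
    simp only [List.foldl_cons]
    rw [show max (max b (h1 - a)) (h1 - c v) = max b (h1 - min a (c v)) by omega, ih]

-- the inner index loop over range(0, len(u)) reads exactly the prefix u of u ++ r
theorem pv_inner (c : Int → Int) (u r : List Int) (h1 b : Int) :
    (PySem.List.pyRange 0 (u.length : Int) 1).foldl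
        (fun m j => max m (h1 - c (PySem.List.pyGetD (u ++ r) j 0))) b
      = u.foldl (fun m v => max m (h1 - c v)) b := by
  rw [PySem.List.foldl_congr_mem _ _
        (fun m j => max m (h1 - c (PySem.List.pyGetD u j 0))) b ?_]
  · exact PySem.List.foldl_pyRange_zero_pyGetD' u 0 (fun m v => max m (h1 - c v)) b
  · intro acc j hj
    rw [PySem.List.mem_pyRange_one] at hj
    have h0 : (0:Int) ≤ j := hj.1
    have h2 : j < (u.length : Int) := hj.2
    have hb : PySem.List.pyGetD (u ++ r) j 0 = PySem.List.pyGetD u j 0 := by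
      rw [PySem.List.pyGetD_eq_getElem _ _ h0 (by simp; omega),
          PySem.List.pyGetD_eq_getElem _ _ h0 (by simpa using h2)]
      exact List.getElem_append_left (by omega)
    simp only [hb]

-- MAIN: the ascending outer loop over indices |p|..|s|-1 of s = (x0::q) ++ t equals
-- B's single sweep over t carrying (best, running min of counts over x0::q).
theorem pv_main (c : Int → Int) (t : List Int) : ∀ (q : List Int) (x0 b : Int),
    (PySem.List.pyRange (((x0::q).length : Int)) ((((x0::q) ++ t).length : Int)) 1).foldl
      (fun m i =>
        (PySem.List.pyRange 0 i 1).foldl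
          (fun m j => max m (c (PySem.List.pyGetD ((x0::q) ++ t) i 0)
                              - c (PySem.List.pyGetD ((x0::q) ++ t) j 0))) m) b
    = (t.foldl (fun (p : Int × Int) v => (max p.1 (c v - p.2), min p.2 (c v)))
        (b, q.foldl (fun a v => min a (c v)) (c x0))).1 := by
  induction t with
  | nil => intro q x0 b; rw [PySem.List.pyRange_one_eq_nil (by simp)]; rfl
  | cons v t ih =>
    intro q x0 b
    have hlt : (((x0::q).length : Int)) < ((((x0::q) ++ v::t).length : Int)) := by
      simp
    rw [PySem.List.pyRange_one_cons hlt]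
    simp only [List.foldl_cons]
    have hget : PySem.List.pyGetD ((x0::q) ++ v::t) ((x0::q).length : Int) 0 = v := by
      rw [PySem.List.pyGetD_natCast]
      rw [List.getD_eq_getElem?_getD, List.getElem?_append_right (by omega)]
      simp
    -- first iteration: i = |x0::q|
    rw [hget, pv_inner c (x0::q) (v::t) (c v) b]
    simp only [List.foldl_cons]
    rw [pv_maxmin c (c v) q b (c x0)]
    -- remaining iterations: shift the prefix to (x0::q)++[v]
    have hre : (x0::q) ++ v::t = (x0::(q ++ [v])) ++ t := by simp
    have hlen : ((x0::q).length : Int) + 1 = ((x0::(q ++ [v])).length : Int) := by simp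
    rw [hre, hlen]
    rw [ih (q ++ [v]) x0 (max b (c v - q.foldl (fun a v => min a (c v)) (c x0)))]
    simp [List.foldl_append]

-- descending outer loop = ascending outer loop (each iteration is a fold of maxes)
theorem pv_reverse (c : Int → Int) (s : List Int) (b : Int) :
    (PySem.List.pyRange ((s.length : Int) - 1) 0 (-1)).foldl
      (fun m i =>
        (PySem.List.pyRange 0 i 1).foldl
          (fun m j => max m (c (PySem.List.pyGetD s i 0) - c (PySem.List.pyGetD s j 0))) m) b
    = (PySem.List.pyRange 1 (s.length : Int) 1).foldl
      (fun m i =>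
        (PySem.List.pyRange 0 i 1).foldl
          (fun m j => max m (c (PySem.List.pyGetD s i 0) - c (PySem.List.pyGetD s j 0))) m) b := by
  rw [PySem.List.pyRange_neg_one_eq_reverse]
  have h1 : (0:Int) + 1 = 1 := by norm_num
  have h2 : (s.length : Int) - 1 + 1 = (s.length : Int) := by ring
  rw [h1, h2]
  exact @List.Perm.foldl_eq _ _
    (fun m i =>
      (PySem.List.pyRange 0 i 1).foldl
        (fun m j => max m (c (PySem.List.pyGetD s i 0) - c (PySem.List.pyGetD s j 0))) m)
    _ _
    ⟨fun m i j =>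
      pv_fswap (fun k => c (PySem.List.pyGetD s i 0) - c (PySem.List.pyGetD s k 0))
        (fun k => c (PySem.List.pyGetD s j 0) - c (PySem.List.pyGetD s k 0))
        (PySem.List.pyRange 0 i 1) (PySem.List.pyRange 0 j 1) m⟩
    (List.reverse_perm _) b

-- ===== VERDICT (by name: the statement is the Claim_ definition above) =====
theorem monitor_spec : Claim_equal_monitor := by
  intro arr n _
  unfold Spec_monitor monitor monitor_alt
  simp only [PySem.Dict.getD_foldl_insert_add_one, PySem.Dict.getD_empty, zero_add,
             PySem.Dict.keys_foldl_insert, PySem.Dict.keys_empty]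
  have hkeys : PySem.Set.update ([] : List Int) arr = PySem.Set.ofList arr := rfl
  rw [hkeys]
  set c : Int → Int := fun v => (arr.count v : Int) with hc
  rcases hs : PySem.List.sorted (PySem.Set.ofList arr) (fun x => x) false with _ | ⟨x0, rest⟩
  · simp [PySem.List.pyRange]
  · rw [pv_reverse c (x0 :: rest) 0]
    have hmain := pv_main c rest [] x0 0
    simp only [List.length_cons, List.length_nil, List.foldl_nil, List.singleton_append,
               Nat.zero_add, Nat.cast_one] at hmain ⊢
    have hfold : (rest.foldl (fun (p : Int × Int) v =>
          (if c v - p.2 > p.1 then c v - p.2 else p.1,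
           if c v < p.2 then c v else p.2)) (0, c x0))
        = rest.foldl (fun (p : Int × Int) v => (max p.1 (c v - p.2), min p.2 (c v))) (0, c x0) := by
      refine PySem.List.foldl_congr_mem rest _ _ _ ?_
      intro p v _
      exact pvStep_eq c p v
    rw [hmain, ← hfold]
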